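-- pv_equiv track=rewrite | github.com/beatobongco/MITx-6.00.2x | unit_1/ps1.py | greedy_cow_transport
-- ===== SOURCE A (Python) =====
-- def greedy_cow_transport(cows,limit=10):
--   """
--   Uses a greedy heuristic to determine an allocation of cows that attempts to
--   minimize the number of spaceship trips needed to transport all the cows. The
--   returned allocation of cows may or may not be optimal.
--   The greedy heuristic should follow the following method:
--
--   1. As long as the current trip can fit another cow, add the largest cow that will fit
--     to the trip
--   2. Once the trip is full, begin a new trip to transport the remaining cows
--
--   Does not mutate the given dictionary of cows.
--
--   Parameters:
--   cows - a dictionary of name (string), weight (int) pairs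
--   limit - weight limit of the spaceship (an int)
--
--   Returns:
--   A list of lists, with each inner list containing the names of cows
--   transported on a particular trip and the overall list containing all the
--   trips
--   """
--   cows_sorted = sorted([(c, cows[c]) for c in cows], key=lambda k: -k[1])
--
--   list_of_trips = []
--
--   while len(cows_sorted) > 0:
--     curr_weight = 0
--     trip = []
--     cc = cows_sorted.copy()
--
--     for cow in cc:
--       if cow[1] + curr_weight <= limit:
--         curr_weight += cow[1]
--         trip.append(cow[0])
--         cows_sorted.remove(cow)
--
--     list_of_trips.append(trip)
--
--   return list_of_trips
-- ===== SOURCE B (Python) =====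
-- def greedy_cow_transport(cows, limit=10):
--   # Same greedy trips, but each round is a single partition pass with a
--   # remaining-capacity countdown (no list copy, no .remove), and the pass
--   # stops early once the capacity drops below the lightest remaining cow.
--   remaining = sorted(cows.items(), key=lambda kv: -kv[1])
--   trips = []
--   while remaining:
--     mn = remaining[-1][1]
--     trip, rest, cap = [], [], limit
--     for i, (name, w) in enumerate(remaining):
--       if cap < mn:
--         rest.extend(remaining[i:])
--         break
--       if w <= cap:
--         trip.append(name)
--         cap -= w
--       else:
--         rest.append((name, w))
--     trips.append(trip)
--     remaining = rest
--   return trips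
-- ===== Notes on version B (the rewrite author's own statement) =====
-- stated objective: faster
-- what changed: Each trip is built by one partition pass that counts remaining capacity down and splits the sorted list into trip/rest, stopping early once capacity falls below the lightest remaining cow, instead of A's full copy of the remaining list, accumulated-weight test and an O(n) list.remove scan per loaded cow.
import Mathlib
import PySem

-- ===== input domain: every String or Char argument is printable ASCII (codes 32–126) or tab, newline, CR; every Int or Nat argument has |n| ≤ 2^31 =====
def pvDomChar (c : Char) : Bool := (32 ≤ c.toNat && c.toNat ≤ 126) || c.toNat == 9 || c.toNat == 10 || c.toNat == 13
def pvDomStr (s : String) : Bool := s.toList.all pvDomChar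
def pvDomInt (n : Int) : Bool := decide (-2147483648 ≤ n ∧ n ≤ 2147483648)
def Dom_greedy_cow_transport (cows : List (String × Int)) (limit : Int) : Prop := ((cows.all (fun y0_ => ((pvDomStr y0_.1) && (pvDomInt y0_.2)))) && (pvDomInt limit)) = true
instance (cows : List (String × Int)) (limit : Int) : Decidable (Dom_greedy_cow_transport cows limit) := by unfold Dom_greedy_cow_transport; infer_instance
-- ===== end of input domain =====

-- B builds each trip by one partition pass with a capacity countdown (plus an early stop
-- once capacity falls below the lightest remaining cow) instead of A's copy + accumulated
-- weight + repeated list.remove scans; equal trips on every input where A terminates.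

-- ===== PORT A =====
-- the inner 'for cow in cc' loop: state = (curr_weight, trip, cows_sorted)
def pvAInner (limit : Int) (cc : List (String × Int))
    (st : Int × List String × List (String × Int)) : Int × List String × List (String × Int) :=
  cc.foldl (fun st cow =>
    if cow.2 + st.1 ≤ limit then
      -- cows_sorted.remove(cow): the cow is always present here, so getD never fires
      (st.1 + cow.2, st.2.1 ++ [cow.1], (PySem.List.remove? st.2.2 cow).getD st.2.2)
    else st) st

-- the 'while len(cows_sorted) > 0' loop; fuel = length + 1 suffices whenever the Python
-- terminates (each round removes at least one cow); on fuel exhaustion (reachable only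
-- where the Python while loop never ends) the trips so far are returned
def pvALoop (limit : Int) : Nat → List (String × Int) → List (List String) → List (List String)
  | 0, _, acc => acc
  | fuel + 1, cs, acc =>
    if cs = [] then acc
    else
      let st := pvAInner limit cs (0, [], cs)
      pvALoop limit fuel st.2.2 (acc ++ [st.2.1])

def greedy_cow_transport (cows : List (String × Int)) (limit : Int) : List (List String) :=
  -- sorted([(c, cows[c]) for c in cows], key=lambda k: -k[1]) — the dict's items, sorted
  let cows_sorted := PySem.List.sorted (PySem.Dict.ofList cows).items (fun k => -k.2) false
  pvALoop limit (cows_sorted.length + 1) cows_sorted []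

-- ===== PORT B =====
-- the 'for i, (name, w) in enumerate(remaining)' pass: returns (trip, rest);
-- 'cap < mn' is the early break that hands the whole tail to rest
def pvPick (mn : Int) : Int → List (String × Int) → List String × List (String × Int)
  | _, [] => ([], [])
  | cap, c :: t =>
    if cap < mn then ([], c :: t)
    else if c.2 ≤ cap then
      let r := pvPick mn (cap - c.2) t
      (c.1 :: r.1, r.2)
    else
      let r := pvPick mn cap t
      (r.1, c :: r.2)

-- 'while remaining:' with mn = remaining[-1][1]; same fuel convention as A's loop
def pvBLoop (limit : Int) : Nat → List (String × Int) → List (List String) → List (List String)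
  | 0, _, acc => acc
  | fuel + 1, rem, acc =>
    match PySem.List.pyGet? rem (-1) with  -- none exactly when the while-guard is false
    | none => acc
    | some last =>
      let r := pvPick last.2 limit rem
      pvBLoop limit fuel r.2 (acc ++ [r.1])

def greedy_cow_transport_alt (cows : List (String × Int)) (limit : Int) : List (List String) :=
  let remaining := PySem.List.sorted (PySem.Dict.ofList cows).items (fun k => -k.2) false
  pvBLoop limit (remaining.length + 1) remaining []

-- ===== PRECONDITION & SPEC =====
def Spec_greedy_cow_transport (cows : List (String × Int)) (limit : Int) (out : List (List String)) : Prop := out = greedy_cow_transport_alt cows limit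
instance (cows : List (String × Int)) (limit : Int) (out : List (List String)) : Decidable (Spec_greedy_cow_transport cows limit out) := by unfold Spec_greedy_cow_transport; infer_instance

-- ===== CLAIM (what is proved, stated in full; the proofs are below) =====
def Claim_equal_greedy_cow_transport : Prop := ∀ (cows : List (String × Int)) (limit : Int), Dom_greedy_cow_transport cows limit → Spec_greedy_cow_transport cows limit (greedy_cow_transport cows limit)

-- ===== LEMMAS AND PROOFS =====

-- proof-side description of one greedy pass: (final capacity, trip, rest)
def pvScan : Int → List (String × Int) → Int × List String × List (String × Int)
  | cap, [] => (cap, [], [])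
  | cap, c :: t =>
    if c.2 ≤ cap then
      let r := pvScan (cap - c.2) t
      (r.1, c.1 :: r.2.1, r.2.2)
    else
      let r := pvScan cap t
      (r.1, r.2.1, c :: r.2.2)

lemma pvScan_rest_sublist (cap : Int) (l : List (String × Int)) :
    (pvScan cap l).2.2.Sublist l := by
  induction l generalizing cap with
  | nil => simp [pvScan]
  | cons c t ih =>
    simp only [pvScan]
    split
    · exact (ih _).cons c
    · exact (ih _).cons₂ c

lemma pvRemove_append (v : String × Int) (pre suf : List (String × Int)) (h : v ∉ pre) :
    PySem.List.remove? (pre ++ v :: suf) v = some (pre ++ suf) := by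
  induction pre with
  | nil => simp
  | cons p t ih =>
    have hne : p ≠ v := by intro e; exact h (e ▸ List.mem_cons_self)
    rw [List.cons_append, PySem.List.remove?_cons_of_ne _ hne,
      ih (fun hm => h (List.mem_cons_of_mem _ hm))]
    simp

lemma pvAInner_eq (limit : Int) :
    ∀ (cc keep : List (String × Int)) (cur : Int) (trip : List String),
    (keep ++ cc).Nodup →
    pvAInner limit cc (cur, trip, keep ++ cc) =
      (limit - (pvScan (limit - cur) cc).1,
        trip ++ (pvScan (limit - cur) cc).2.1,
        keep ++ (pvScan (limit - cur) cc).2.2) := by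
  intro cc
  induction cc with
  | nil => intro keep cur trip _; simp [pvAInner, pvScan]
  | cons c t ih =>
    intro keep cur trip hnd
    by_cases hfit : c.2 + cur ≤ limit
    · have hc2 : c.2 ≤ limit - cur := by omega
      have hnotin : c ∉ keep := by
        have := List.disjoint_of_nodup_append hnd
        exact fun hm => this hm List.mem_cons_self
      have hnd' : (keep ++ t).Nodup := by
        refine List.Nodup.sublist ?_ hnd
        exact List.Sublist.append_left (List.sublist_cons_self c t) keep
      simp only [pvAInner, List.foldl_cons, if_pos hfit, pvRemove_append c keep t hnotin,
        Option.getD_some]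
      have := ih keep (cur + c.2) (trip ++ [c.1]) hnd'
      simp only [pvAInner] at this
      rw [this]
      simp only [pvScan, if_pos hc2]
      have harg : limit - (cur + c.2) = limit - cur - c.2 := by ring
      rw [harg]
      simp
    · have hc2 : ¬ c.2 ≤ limit - cur := by omega
      have hnd' : ((keep ++ [c]) ++ t).Nodup := by
        rw [List.append_assoc]; simpa using hnd
      simp only [pvAInner, List.foldl_cons, if_neg hfit]
      have := ih (keep ++ [c]) cur trip hnd'
      simp only [pvAInner, List.append_assoc, List.singleton_append] at this
      rw [this]
      simp only [pvScan, if_neg hc2]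
lemma pvScan_no_fit (cap : Int) (l : List (String × Int)) (h : ∀ p ∈ l, ¬ p.2 ≤ cap) :
    pvScan cap l = (cap, [], l) := by
  induction l with
  | nil => rfl
  | cons c t ih =>
    simp only [pvScan, if_neg (h c List.mem_cons_self)]
    rw [ih (fun p hp => h p (List.mem_cons_of_mem _ hp))]

lemma pvPick_eq_pvScan (mn : Int) (cap : Int) (l : List (String × Int))
    (h : ∀ p ∈ l, mn ≤ p.2) :
    pvPick mn cap l = ((pvScan cap l).2.1, (pvScan cap l).2.2) := by
  induction l generalizing cap with
  | nil => rfl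
  | cons c t ih =>
    by_cases hbr : cap < mn
    · have : pvScan cap (c :: t) = (cap, [], c :: t) :=
        pvScan_no_fit cap (c :: t) (fun p hp => by have := h p hp; omega)
      rw [this]
      simp [pvPick, if_pos hbr]
    · simp only [pvPick, if_neg hbr, pvScan]
      split
      · rw [ih _ (fun p hp => h p (List.mem_cons_of_mem _ hp))]
      · rw [ih _ (fun p hp => h p (List.mem_cons_of_mem _ hp))]

lemma pvLast_le (l : List (String × Int)) (hne : l ≠ [])
    (hp : l.Pairwise (fun a b => -a.2 ≤ -b.2)) :
    ∀ p ∈ l, (l.getLast hne).2 ≤ p.2 := by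
  intro p hp'
  obtain ⟨i, hi, rfl⟩ := List.getElem_of_mem hp'
  rw [List.getLast_eq_getElem hne]
  by_cases hlastidx : i = l.length - 1
  · subst hlastidx; exact le_refl _
  · have hlt : i < l.length - 1 := by omega
    have := (List.pairwise_iff_getElem.mp hp) i (l.length - 1) hi (by omega) hlt
    omega

lemma pvLoop_eq (limit : Int) :
    ∀ (fuel : Nat) (rem : List (String × Int)) (acc : List (List String)),
    rem.Nodup → rem.Pairwise (fun a b => -a.2 ≤ -b.2) →
    pvALoop limit fuel rem acc = pvBLoop limit fuel rem acc := by
  intro fuel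
  induction fuel with
  | zero => intro rem acc _ _; rfl
  | succ n ih =>
    intro rem acc hnd hp
    by_cases hne : rem = []
    · subst hne; rfl
    · have hlastget : PySem.List.pyGet? rem (-1) = some (rem.getLast hne) := by
        rw [PySem.List.pyGet?_neg_one, List.getLast?_eq_some_getLast]
      have hmn : ∀ p ∈ rem, (rem.getLast hne).2 ≤ p.2 := pvLast_le _ hne hp
      have hinner := pvAInner_eq limit rem [] 0 [] (by simpa using hnd)
      simp only [List.nil_append] at hinner
      have hpick := pvPick_eq_pvScan (rem.getLast hne).2 limit rem hmn
      have hsub := pvScan_rest_sublist limit rem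
      simp only [pvALoop, if_neg hne, pvBLoop, hlastget]
      rw [hinner, hpick]
      have h0 : limit - 0 = limit := by ring
      rw [h0] at hinner ⊢
      exact ih _ _ (hnd.sublist hsub) (hp.sublist hsub)

lemma pvSortedItems_nodup (cows : List (String × Int)) :
    (PySem.List.sorted (PySem.Dict.ofList cows).items (fun k : String × Int => -k.2) false).Nodup := by
  have hkeys : (PySem.Dict.ofList cows).keys.Nodup := PySem.Dict.nodup_keys_ofList cows
  have hitems : (PySem.Dict.ofList cows).items.Nodup := by
    have : (PySem.Dict.ofList cows).items.map (·.1) = (PySem.Dict.ofList cows).keys := rfl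
    exact List.Nodup.of_map (·.1) (this ▸ hkeys)
  exact (PySem.List.sorted_perm _ _ _).nodup_iff.mpr hitems

-- ===== VERDICT (by name: the statement is the Claim_ definition above) =====
theorem greedy_cow_transport_spec : Claim_equal_greedy_cow_transport := by
  intro cows limit _
  unfold Spec_greedy_cow_transport greedy_cow_transport greedy_cow_transport_alt
  exact pvLoop_eq limit _ _ [] (pvSortedItems_nodup cows)
    (PySem.List.sorted_pairwise _ _)
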